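-- pv_equiv track=rewrite | github.com/MrBrantCode/unitest_baseline | mut_generate/mist_train_cf/cf_66509/solution.py | rotate_deque
-- ===== SOURCE A (Python) =====
-- def rotate_deque(deque_items, binary_string):
--     from collections import deque
--     d = deque(deque_items)
--     for i in binary_string:
--         if i == '1':
--             d.rotate(1)
--         else:
--             d.rotate(-1)
--     return list(d)
-- ===== SOURCE B (Python) =====
-- def rotate_deque(deque_items, binary_string):
--     n = len(deque_items)
--     if n == 0:
--         return []
--     shift = (len(binary_string) - 2 * binary_string.count('1')) % n
--     return deque_items[shift:] + deque_items[:shift]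
-- ===== Notes on version B (the rewrite author's own statement) =====
-- stated objective: faster
-- what changed: Replaces the per-character deque.rotate(+/-1) loop with a closed-form net rotation: count '1's once and perform a single slice-based rotation by (len(s) - 2*ones) mod n.
import Mathlib
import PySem

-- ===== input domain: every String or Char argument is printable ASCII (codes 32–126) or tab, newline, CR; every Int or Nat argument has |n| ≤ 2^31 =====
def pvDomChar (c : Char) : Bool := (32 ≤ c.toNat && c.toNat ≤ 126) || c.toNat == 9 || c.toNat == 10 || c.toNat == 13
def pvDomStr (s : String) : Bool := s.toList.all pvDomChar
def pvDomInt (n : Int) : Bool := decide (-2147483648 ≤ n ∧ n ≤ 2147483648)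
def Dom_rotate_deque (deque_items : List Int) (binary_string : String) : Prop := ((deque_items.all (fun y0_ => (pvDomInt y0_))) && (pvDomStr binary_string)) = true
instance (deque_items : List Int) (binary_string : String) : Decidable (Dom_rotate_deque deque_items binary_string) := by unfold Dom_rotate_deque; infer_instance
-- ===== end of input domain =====

-- B replaces A's per-character deque.rotate(+/-1) loop with a single rotation by the
-- net amount (len(s) - 2*count('1')) mod n, done with one slice (objective: faster, constant-factor).

-- ===== PORT A =====
-- deque.rotate(1): last element moves to the front (identity on [] and singletons)
def pyRotPos1 (l : List Int) : List Int := l.drop (l.length - 1) ++ l.take (l.length - 1)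
-- deque.rotate(-1): first element moves to the back
def pyRotNeg1 (l : List Int) : List Int :=
  match l with
  | [] => []
  | x :: xs => xs ++ [x]

def rotate_deque (deque_items : List Int) (binary_string : String) : List Int :=
  binary_string.toList.foldl
    (fun d i => if i = '1' then pyRotPos1 d else pyRotNeg1 d) deque_items

-- ===== PORT B =====
-- str.count('1') for a 1-character pattern is exactly the character count;
-- items[shift:] + items[:shift] with 0 ≤ shift < n is exactly drop/take.
def rotate_deque_alt (deque_items : List Int) (binary_string : String) : List Int :=
  let n := deque_items.length
  if n = 0 then []
  else
    let shift : Int :=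
      ((binary_string.toList.length : Int) - 2 * (binary_string.toList.count '1' : Int)).emod n
    deque_items.drop shift.toNat ++ deque_items.take shift.toNat

-- ===== PRECONDITION & SPEC =====
def Spec_rotate_deque (deque_items : List Int) (binary_string : String) (out : List Int) : Prop := out = rotate_deque_alt deque_items binary_string
instance (deque_items : List Int) (binary_string : String) (out : List Int) : Decidable (Spec_rotate_deque deque_items binary_string out) := by unfold Spec_rotate_deque; infer_instance

-- ===== CLAIM (what is proved, stated in full; the proofs are below) =====
def Claim_equal_rotate_deque : Prop := ∀ (deque_items : List Int) (binary_string : String), Dom_rotate_deque deque_items binary_string → Spec_rotate_deque deque_items binary_string (rotate_deque deque_items binary_string)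

-- ===== LEMMAS AND PROOFS =====

theorem pyRotPos1_eq_rotate (l : List Int) : pyRotPos1 l = l.rotate (l.length - 1) := by
  rw [List.rotate_eq_drop_append_take (Nat.sub_le _ _)]; rfl

theorem pyRotNeg1_eq_rotate (l : List Int) (h : l ≠ []) : pyRotNeg1 l = l.rotate 1 := by
  match l with
  | [] => exact absurd rfl h
  | x :: xs =>
    rw [List.rotate_eq_drop_append_take (by simp)]
    rfl

-- A's loop, starting from a rotation of l, is a rotation of l by the accumulated amount.
theorem foldA (l : List Int) (hl : l ≠ []) (cs : List Char) (k : Nat) :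
    cs.foldl (fun d i => if i = '1' then pyRotPos1 d else pyRotNeg1 d) (l.rotate k)
      = l.rotate (k + (cs.map (fun c => if c = '1' then l.length - 1 else 1)).sum) := by
  induction cs generalizing k with
  | nil => simp
  | cons c cs ih =>
    have hne : l.rotate k ≠ [] := by
      intro h
      exact hl (List.eq_nil_of_length_eq_zero (by simpa [List.length_rotate] using congrArg List.length h))
    simp only [List.foldl_cons, List.map_cons, List.sum_cons]
    by_cases hc : c = '1'
    · rw [if_pos hc, pyRotPos1_eq_rotate, List.length_rotate, List.rotate_rotate, ih]
      rw [if_pos hc]; ring_nf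
    · rw [if_neg hc, pyRotNeg1_eq_rotate _ hne, List.rotate_rotate, ih]
      rw [if_neg hc]; ring_nf

theorem sum_weights (L : Nat) (hL : 1 ≤ L) (cs : List Char) :
    ((cs.map (fun c => if c = '1' then L - 1 else 1)).sum : Int)
      = (cs.count '1') * L + ((cs.length : Int) - 2 * (cs.count '1')) := by
  induction cs with
  | nil => simp
  | cons c cs ih =>
    by_cases hc : c = '1'
    · subst hc
      simp only [List.map_cons, List.sum_cons, List.length_cons]
      simp only [List.count_cons, beq_iff_eq]
      push_cast [Nat.cast_sub hL] at ih ⊢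
      rw [ih]; ring
    · simp only [List.map_cons, List.sum_cons, if_neg hc, List.length_cons]
      simp only [List.count_cons, beq_iff_eq, if_neg hc]
      push_cast at ih ⊢
      rw [ih]; ring

-- ===== VERDICT (by name: the statement is the Claim_ definition above) =====
theorem rotate_deque_spec : Claim_equal_rotate_deque := by
  intro l s _
  unfold Spec_rotate_deque rotate_deque rotate_deque_alt
  by_cases hl : l = []
  · subst hl
    simp only [List.length_nil]
    induction s.toList with
    | nil => simp
    | cons c cs ih => simpa [pyRotPos1, pyRotNeg1] using ih
  · have hL : 1 ≤ l.length := List.length_pos_iff.mpr hl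
    set cs := s.toList with hcs
    set w : Nat := (cs.map (fun c => if c = '1' then l.length - 1 else 1)).sum with hw
    have hA : cs.foldl (fun d i => if i = '1' then pyRotPos1 d else pyRotNeg1 d) l
        = l.rotate w := by simpa using foldA l hl cs 0
    set x : Int := (cs.length : Int) - 2 * (cs.count '1' : Int) with hx
    set shift : Int := x.emod l.length with hshift
    have hLpos : (0 : Int) < l.length := by exact_mod_cast hL
    have hsh_nonneg : 0 ≤ shift := Int.emod_nonneg _ (by omega)
    have hsh_lt : shift < (l.length : Int) := Int.emod_lt_of_pos _ hLpos
    have ht : (shift.toNat : Int) = shift := Int.toNat_of_nonneg hsh_nonneg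
    have htle : shift.toNat ≤ l.length := by omega
    have hwI : (w : Int) = (cs.count '1') * l.length + x := by
      rw [hw, sum_weights l.length hL cs, hx]
    have hmodI : (w : Int) % (l.length : Int) = shift := by
      rw [hwI, add_comm, Int.add_mul_emod_self_right]
      rw [hshift]; rfl
    have hmodN : w % l.length = shift.toNat := by
      have : ((w % l.length : Nat) : Int) = (shift.toNat : Int) := by
        rw [Int.natCast_mod, hmodI, ht]
      exact_mod_cast this
    have hB : l.drop shift.toNat ++ l.take shift.toNat = l.rotate shift.toNat :=
      (List.rotate_eq_drop_append_take htle).symm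
    simp only [if_neg (by omega : ¬ l.length = 0)]
    rw [hA, hB, ← hmodN, List.rotate_mod]
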